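-- pv_equiv track=rewrite | github.com/dj-lumiere/problem-solving-boj | 백준/Silver/16974. 레벨 햄버거/레벨 햄버거.py | eaten_patty_count
-- ===== SOURCE A (Python) =====
-- def layer_count(N: int) -> int:
--     if N == 0:
--         return 1
--     else:
--         memo = 1
--         for i in range(N):
--             memo = 2 * memo + 3
--         return memo
--
-- def patty_count(N: int) -> int:
--     if N == 0:
--         return 1
--     else:
--         memo = 1
--         for i in range(N):
--             memo = 2 * memo + 1
--         return memo
--
-- def eaten_patty_count(N: int, eaten_layer_count: int) -> int:
--     if eaten_layer_count == 0:
--         return 0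
--     elif N == 0 and eaten_layer_count == 1:
--         return 1
--     elif N != 0 and eaten_layer_count == 1:
--         return 0
--     else:
--         if eaten_layer_count == layer_count(N-1) + 2:
--             return patty_count(N-1) + 1
--         elif eaten_layer_count == layer_count(N):
--             return patty_count(N)
--         elif eaten_layer_count < layer_count(N-1) + 2:
--             return eaten_patty_count(N-1, eaten_layer_count-1)
--         else:
--             return patty_count(N-1) + 1 + eaten_patty_count(N-1, eaten_layer_count - layer_count(N-1) - 2)
-- ===== SOURCE B (Python) =====
-- def eaten_patty_count(N: int, eaten_layer_count: int) -> int: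
--     # Iterative descent with closed-form layer/patty counts (O(N) instead of A's O(N^2)).
--     ans, n, x = 0, N, eaten_layer_count
--     while x >= 2:
--         if n >= 1:
--             lc_sub = (1 << (n + 1)) - 3   # layer count of level n-1
--             pc_sub = (1 << n) - 1         # patty count of level n-1
--         else:
--             lc_sub = pc_sub = 1
--         if x == lc_sub + 2:
--             return ans + pc_sub + 1
--         if n >= 1 and x == 2 * lc_sub + 3:   # whole level-n burger
--             return ans + 2 * pc_sub + 1
--         if x < lc_sub + 2:
--             n, x = n - 1, x - 1
--         else:
--             ans += pc_sub + 1
--             n, x = n - 1, x - lc_sub - 2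
--     if x == 1:
--         return ans + (1 if n == 0 else 0)
--     return ans
-- ===== Notes on version B (the rewrite author's own statement) =====
-- stated objective: faster
-- what changed: Replaced A's recursive descent that recomputes layer_count/patty_count by an O(level) loop on every recursion level (O(N^2) total) with a single iterative descent using closed-form powers of two (bit shifts) for the layer/patty counts, accumulating the answer in O(N).
import Mathlib
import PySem

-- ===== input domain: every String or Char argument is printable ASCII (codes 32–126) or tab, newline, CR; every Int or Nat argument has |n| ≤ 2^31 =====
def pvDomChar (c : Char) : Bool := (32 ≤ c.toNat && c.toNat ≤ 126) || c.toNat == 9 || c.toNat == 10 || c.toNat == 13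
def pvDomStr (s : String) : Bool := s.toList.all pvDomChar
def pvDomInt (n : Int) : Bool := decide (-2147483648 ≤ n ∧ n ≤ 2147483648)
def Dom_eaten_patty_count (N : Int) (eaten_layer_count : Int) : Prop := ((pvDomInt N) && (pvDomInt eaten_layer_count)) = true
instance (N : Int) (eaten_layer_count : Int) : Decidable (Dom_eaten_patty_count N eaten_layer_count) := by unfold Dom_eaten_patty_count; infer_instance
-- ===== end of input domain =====

-- B replaces A's recursion that re-runs O(level) loops for layer_count/patty_count at every
-- level (O(N^2)) by one iterative descent with closed-form powers of two, O(N); same values.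

-- ===== PORT A =====
def layer_count (N : Int) : Int :=
  if N = 0 then 1
  else (PySem.List.pyRange 0 N 1).foldl (fun memo _ => 2 * memo + 3) 1

def patty_count (N : Int) : Int :=
  if N = 0 then 1
  else (PySem.List.pyRange 0 N 1).foldl (fun memo _ => 2 * memo + 1) 1

-- A's recursion terminates for eaten_layer_count ≥ 0 (each call strictly decreases it while
-- keeping it ≥ 0) and diverges (RecursionError) for negative values; `fuel` only makes the
-- same computation total in Lean — it never runs out on inputs satisfying Pre_.
def epcA : Nat → Int → Int → Int
  | 0, _, _ => 0
  | fuel + 1, N, x =>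
    if x = 0 then 0
    else if N = 0 ∧ x = 1 then 1
    else if N ≠ 0 ∧ x = 1 then 0
    else if x = layer_count (N - 1) + 2 then patty_count (N - 1) + 1
    else if x = layer_count N then patty_count N
    else if x < layer_count (N - 1) + 2 then epcA fuel (N - 1) (x - 1)
    else patty_count (N - 1) + 1 + epcA fuel (N - 1) (x - layer_count (N - 1) - 2)

def eaten_patty_count (N : Int) (eaten_layer_count : Int) : Int :=
  epcA (eaten_layer_count.toNat + 1) N eaten_layer_count

-- ===== PORT B =====
-- closed-form layer / patty count of level n-1 (Python: (1 << (n+1)) - 3 and (1 << n) - 1)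
def lcsub (n : Int) : Int := if 1 ≤ n then 2 ^ (n + 1).toNat - 3 else 1
def pcsub (n : Int) : Int := if 1 ≤ n then 2 ^ n.toNat - 1 else 1

lemma lcsub_ge_one (n : Int) : 1 ≤ lcsub n := by
  unfold lcsub
  split_ifs with h
  · have h2 : (2 : Int) ^ 2 ≤ 2 ^ (n + 1).toNat := by
      apply pow_le_pow_right₀ (by norm_num)
      omega
    norm_num at h2
    omega
  · omega

def epcLoop (ans : Int) (n : Int) (x : Int) : Int :=
  if 2 ≤ x then
    if x = lcsub n + 2 then ans + pcsub n + 1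
    else if 1 ≤ n ∧ x = 2 * lcsub n + 3 then ans + 2 * pcsub n + 1
    else if x < lcsub n + 2 then epcLoop ans (n - 1) (x - 1)
    else epcLoop (ans + pcsub n + 1) (n - 1) (x - lcsub n - 2)
  else if x = 1 then ans + (if n = 0 then 1 else 0)
  else ans
termination_by x.toNat
decreasing_by
  · omega
  · have := lcsub_ge_one n
    omega

def eaten_patty_count_alt (N : Int) (eaten_layer_count : Int) : Int :=
  epcLoop 0 N eaten_layer_count

-- ===== PRECONDITION & SPEC =====
-- Pre_ excludes eaten_layer_count < 0, where A's recursion never reaches a base case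
-- (Python raises RecursionError); B's loop exits immediately there.
def Pre_eaten_patty_count (N : Int) (eaten_layer_count : Int) : Prop := 0 ≤ eaten_layer_count
instance (N : Int) (eaten_layer_count : Int) : Decidable (Pre_eaten_patty_count N eaten_layer_count) := by unfold Pre_eaten_patty_count; infer_instance

def pvWitness_eaten_patty_count : Int × Int := (2, 5)

def Spec_eaten_patty_count (N : Int) (eaten_layer_count : Int) (out : Int) : Prop := out = eaten_patty_count_alt N eaten_layer_count
instance (N : Int) (eaten_layer_count : Int) (out : Int) : Decidable (Spec_eaten_patty_count N eaten_layer_count out) := by unfold Spec_eaten_patty_count; infer_instance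

-- ===== CLAIM (what is proved, stated in full; the proofs are below) =====
def Claim_equal_eaten_patty_count : Prop := ∀ (N : Int) (eaten_layer_count : Int), Dom_eaten_patty_count N eaten_layer_count → Pre_eaten_patty_count N eaten_layer_count → Spec_eaten_patty_count N eaten_layer_count (eaten_patty_count N eaten_layer_count)

-- ===== LEMMAS AND PROOFS =====

lemma foldl_lc (l : List Int) (m : Int) :
    l.foldl (fun memo _ => 2 * memo + 3) m = 2 ^ l.length * (m + 3) - 3 := by
  induction l generalizing m with
  | nil => simp
  | cons a t ih =>
    simp only [List.foldl_cons, List.length_cons, ih]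
    ring

lemma foldl_pc (l : List Int) (m : Int) :
    l.foldl (fun memo _ => 2 * memo + 1) m = 2 ^ l.length * (m + 1) - 1 := by
  induction l generalizing m with
  | nil => simp
  | cons a t ih =>
    simp only [List.foldl_cons, List.length_cons, ih]
    ring

lemma lc_eq (n : Int) : layer_count n = if 0 ≤ n then 2 ^ (n.toNat + 2) - 3 else 1 := by
  unfold layer_count
  have hfold := foldl_lc (PySem.List.pyRange 0 n 1) 1
  rw [PySem.List.length_pyRange_one] at hfold
  by_cases h0 : n = 0
  · subst h0; norm_num
  · rw [if_neg h0, hfold]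
    by_cases hp : 0 ≤ n
    · rw [if_pos hp]
      have he : (n - 0).toNat = n.toNat := by omega
      rw [he, pow_add]
      ring
    · rw [if_neg hp]
      have he : (n - 0).toNat = 0 := by omega
      rw [he]; norm_num

lemma pc_eq (n : Int) : patty_count n = if 0 ≤ n then 2 ^ (n.toNat + 1) - 1 else 1 := by
  unfold patty_count
  have hfold := foldl_pc (PySem.List.pyRange 0 n 1) 1
  rw [PySem.List.length_pyRange_one] at hfold
  by_cases h0 : n = 0
  · subst h0; norm_num
  · rw [if_neg h0, hfold]
    by_cases hp : 0 ≤ n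
    · rw [if_pos hp]
      have he : (n - 0).toNat = n.toNat := by omega
      rw [he, pow_add]
      ring
    · rw [if_neg hp]
      have he : (n - 0).toNat = 0 := by omega
      rw [he]; norm_num

lemma lc_ge_one (n : Int) : 1 ≤ layer_count n := by
  rw [lc_eq]
  split_ifs with h
  · have h2 : (2 : Int) ^ 2 ≤ 2 ^ (n.toNat + 2) := by
      apply pow_le_pow_right₀ (by norm_num)
      omega
    norm_num at h2
    omega
  · omega

lemma lcsub_eq (n : Int) : lcsub n = layer_count (n - 1) := by
  rw [lcsub, lc_eq]
  by_cases h : 1 ≤ n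
  · rw [if_pos h, if_pos (by omega : (0:Int) ≤ n - 1)]
    have he : (n + 1).toNat = (n - 1).toNat + 2 := by omega
    rw [he]
  · rw [if_neg h, if_neg (by omega : ¬ (0:Int) ≤ n - 1)]

lemma pcsub_eq (n : Int) : pcsub n = patty_count (n - 1) := by
  rw [pcsub, pc_eq]
  by_cases h : 1 ≤ n
  · rw [if_pos h, if_pos (by omega : (0:Int) ≤ n - 1)]
    have he : n.toNat = (n - 1).toNat + 1 := by omega
    rw [he]
  · rw [if_neg h, if_neg (by omega : ¬ (0:Int) ≤ n - 1)]

-- level-n counts via level-(n-1) counts, and when the "whole burger" test can fire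
lemma lcn_iff (n x : Int) (hx : 2 ≤ x) :
    (1 ≤ n ∧ x = 2 * layer_count (n - 1) + 3) ↔ x = layer_count n := by
  rw [lc_eq n, lc_eq (n - 1)]
  by_cases h : 1 ≤ n
  · rw [if_pos (by omega : (0:Int) ≤ n - 1), if_pos (by omega : (0:Int) ≤ n)]
    have he : n.toNat + 2 = ((n - 1).toNat + 2) + 1 := by omega
    have hpow : (2:Int) ^ (n.toNat + 2) = 2 * 2 ^ ((n - 1).toNat + 2) := by
      rw [he, pow_succ]; ring
    rw [hpow]
    constructor
    · rintro ⟨-, hx2⟩; omega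
    · intro hx2; exact ⟨h, by omega⟩
  · rw [if_neg (by omega : ¬ (0:Int) ≤ n - 1)]
    constructor
    · rintro ⟨h1, -⟩; omega
    · intro hx2
      split_ifs at hx2 with h0
      · have h2 : (2 : Int) ^ 2 ≤ 2 ^ (n.toNat + 2) := by
          apply pow_le_pow_right₀ (by norm_num)
          omega
        norm_num at h2
        exfalso
        have hn0 : n = 0 := by omega
        subst hn0
        simp at hx2
        omega
      · omega

lemma pcn_eq (n : Int) (h : 1 ≤ n) : patty_count n = 2 * patty_count (n - 1) + 1 := by
  rw [pc_eq, pc_eq]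
  rw [if_pos (by omega : (0:Int) ≤ n), if_pos (by omega : (0:Int) ≤ n - 1)]
  have he : n.toNat + 1 = ((n - 1).toNat + 1) + 1 := by omega
  rw [he, pow_succ]
  ring

lemma epcA_fuel : ∀ (k f g : Nat) (N x : Int), 0 ≤ x → x.toNat ≤ k →
    x.toNat < f → x.toNat < g → epcA f N x = epcA g N x := by
  intro k
  induction k with
  | zero =>
    intro f g N x hx hk hf hg
    match f, g with
    | f' + 1, g' + 1 =>
      have hx0 : x = 0 := by omega
      subst hx0
      simp [epcA]
  | succ k ih =>
    intro f g N x hx hk hf hg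
    match f, g with
    | f' + 1, g' + 1 =>
      show epcA (f' + 1) N x = epcA (g' + 1) N x
      simp only [epcA]
      have hlc := lc_ge_one (N - 1)
      split_ifs with h1 h2 h3 h4 h5 h6
      · rfl
      · rfl
      · rfl
      · rfl
      · rfl
      · -- x < layer_count (N-1) + 2 branch
        have hx2 : 2 ≤ x := by omega
        exact ih f' g' (N - 1) (x - 1) (by omega) (by omega) (by omega) (by omega)
      · -- last branch
        have hx2 : 2 ≤ x := by omega
        have := ih f' g' (N - 1) (x - layer_count (N - 1) - 2) (by omega) (by omega)
          (by omega) (by omega)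
        rw [this]

lemma bridge : ∀ (k : Nat) (N x ans : Int), 0 ≤ x → x.toNat ≤ k →
    epcLoop ans N x = ans + epcA (x.toNat + 1) N x := by
  intro k
  induction k with
  | zero =>
    intro N x ans hx hk
    have hx0 : x = 0 := by omega
    subst hx0
    rw [epcLoop]
    simp [epcA]
  | succ k ih =>
    intro N x ans hx hk
    by_cases hx2 : 2 ≤ x
    · rw [epcLoop, if_pos hx2, lcsub_eq, pcsub_eq]
      have hxe : epcA (x.toNat + 1) N x =
          if x = 0 then 0
          else if N = 0 ∧ x = 1 then 1
          else if N ≠ 0 ∧ x = 1 then 0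
          else if x = layer_count (N - 1) + 2 then patty_count (N - 1) + 1
          else if x = layer_count N then patty_count N
          else if x < layer_count (N - 1) + 2 then epcA x.toNat (N - 1) (x - 1)
          else patty_count (N - 1) + 1 + epcA x.toNat (N - 1) (x - layer_count (N - 1) - 2) := by
        rw [epcA.eq_2]
      rw [hxe]
      rw [if_neg (by omega : ¬ x = 0), if_neg (by omega : ¬ (N = 0 ∧ x = 1)),
          if_neg (by omega : ¬ (N ≠ 0 ∧ x = 1))]
      have hlc := lc_ge_one (N - 1)
      by_cases hb1 : x = layer_count (N - 1) + 2
      · rw [if_pos hb1, if_pos hb1]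
        ring
      · rw [if_neg hb1, if_neg hb1]
        by_cases hb2 : x = layer_count N
        · rw [if_pos hb2, if_pos ((lcn_iff N x hx2).mpr hb2)]
          obtain ⟨hN, -⟩ := (lcn_iff N x hx2).mpr hb2
          rw [pcn_eq N hN]
          ring
        · rw [if_neg hb2, if_neg (fun h => hb2 ((lcn_iff N x hx2).mp h))]
          by_cases hb3 : x < layer_count (N - 1) + 2
          · rw [if_pos hb3, if_pos hb3]
            rw [ih (N - 1) (x - 1) ans (by omega) (by omega)]
            congr 1
            exact epcA_fuel x.toNat ((x - 1).toNat + 1) x.toNat (N - 1) (x - 1)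
              (by omega) (by omega) (by omega) (by omega)
          · rw [if_neg hb3, if_neg hb3]
            rw [ih (N - 1) (x - layer_count (N - 1) - 2) (ans + patty_count (N - 1) + 1)
              (by omega) (by omega)]
            rw [epcA_fuel x.toNat ((x - layer_count (N - 1) - 2).toNat + 1) x.toNat (N - 1)
              (x - layer_count (N - 1) - 2) (by omega) (by omega) (by omega) (by omega)]
            ring
    · by_cases hx1 : x = 1
      · subst hx1
        rw [epcLoop]
        norm_num
        by_cases hN : N = 0
        · subst hN; simp [epcA]
        · simp [epcA, hN]
      · have hx0 : x = 0 := by omega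
        subst hx0
        rw [epcLoop]
        simp [epcA]

-- ===== VERDICT (by name: the statement is the Claim_ definition above) =====
theorem eaten_patty_count_spec : Claim_equal_eaten_patty_count := by
  intro N x _ hpre
  unfold Spec_eaten_patty_count eaten_patty_count eaten_patty_count_alt
  rw [bridge x.toNat N x 0 hpre (le_refl _)]
  ring
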